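-- pv_equiv track=rewrite | github.com/treenoder/ALGLB | LB4/E_02/main.py | solution
-- ===== SOURCE A (Python) =====
-- def solution(m):
--     """
--     Знаходить ребра з максимальним та мінімальним вагами в неорієнтованому зваженому графі.
--
--     Аргументи:
--     m (list[list[int]]): Матриця суміжності графа, де m[i][j] вказує на вагу ребра між вершинами i та j.
--
--     Повертає:
--     list[list[int]]: Список ребер з максимальним та мінімальним вагами.
--                      Спочатку йдуть ребра з максимальним вагами в порядку зростання вершин,
--                      потім ребра з мінімальним вагами в порядку спадання вершин.
--     """
--     # Кількість вершин у графі
--     n = len(m)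
--
--     # Список ребер з максимальною вагою
--     max_edges = []
--
--     # Список ребер з мінімальною вагою
--     min_edges = []
--
--     # Ініціалізація максимальної ваги мінімальним можливим значенням
--     max_weight = float('-inf')
--
--     # Ініціалізація мінімальної ваги максимальним можливим значенням
--     min_weight = float('inf')
--
--     for i in range(n):
--         for j in range(i + 1, n):
--             # Пропустити неіснуючі або не позитивні ребра
--             if m[i][j] <= 0:
--                 continue
--
--             # Оновлення максимальної ваги і ребер з цією вагою
--             if m[i][j] > max_weight:
--                 max_weight = m[i][j]
--                 max_edges = [[i + 1, j + 1]]
--             elif m[i][j] == max_weight: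
--                 max_edges.append([i + 1, j + 1])
--
--             # Оновлення мінімальної ваги і ребер з цією вагою
--             if m[i][j] < min_weight:
--                 min_weight = m[i][j]
--                 min_edges = [[i + 1, j + 1]]
--             elif m[i][j] == min_weight:
--                 min_edges.append([i + 1, j + 1])
--
--     # Сортування ребер з максимальною вагою в порядку зростання вершин
--     max_edges.sort(key=lambda x: [x[0], x[1]])
--
--     # Сортування ребер з мінімальною вагою в порядку спадання вершин
--     min_edges.sort(key=lambda x: [-x[0], -x[1]])
--
--     res = max_edges + min_edges
--     return res
-- ===== SOURCE B (Python) =====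
-- def solution(m):
--     n = len(m)
--     edges = [(i + 1, j + 1, m[i][j]) for i in range(n) for j in range(i + 1, n) if m[i][j] > 0]
--     if not edges:
--         return []
--     weights = [w for (_, _, w) in edges]
--     mx = max(weights)
--     mn = min(weights)
--     top = sorted((a, b) for (a, b, w) in edges if w == mx)
--     bot = sorted(((a, b) for (a, b, w) in edges if w == mn), reverse=True)
--     return [[a, b] for (a, b) in top + bot]
-- ===== Notes on version B (the rewrite author's own statement) =====
-- stated objective: simpler
-- what changed: B replaces A's online running-max/running-min loop with rebuilt edge lists by one gather of all positive upper-triangle edges followed by max/min, two filters and two sorts.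
import Mathlib
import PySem

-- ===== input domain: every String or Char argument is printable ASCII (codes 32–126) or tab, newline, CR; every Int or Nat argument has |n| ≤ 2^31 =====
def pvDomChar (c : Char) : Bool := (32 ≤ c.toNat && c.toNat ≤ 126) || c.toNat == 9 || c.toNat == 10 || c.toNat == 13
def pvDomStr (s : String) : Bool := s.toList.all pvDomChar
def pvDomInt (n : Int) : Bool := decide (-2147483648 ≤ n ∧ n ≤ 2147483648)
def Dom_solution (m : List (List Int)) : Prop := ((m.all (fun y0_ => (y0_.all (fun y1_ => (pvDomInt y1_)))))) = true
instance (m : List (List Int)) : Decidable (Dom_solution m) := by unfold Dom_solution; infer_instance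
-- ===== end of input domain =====

-- B gathers all positive upper-triangle edges once, filters by the max/min weight and sorts, instead of A's online argmax/argmin loop (objective: simpler).

-- ===== PORT A =====
-- m[i][j]; the .getD defaults are reached only outside Pre_solution (Python raises IndexError there)
def getw (m : List (List Int)) (i j : Int) : Int :=
  (PySem.List.pyGet? ((PySem.List.pyGet? m i).getD []) j).getD 0

-- 'if m[i][j] > max_weight … elif == …' with max_weight = float('-inf') modelled as none (always exceeded)
def aStepMax (w a b : Int) (s : List (List Int) × Option Int) : List (List Int) × Option Int :=
  if (match s.2 with | none => true | some v => decide (v < w)) = true then ([[a, b]], some w)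
  else if s.2 = some w then (s.1 ++ [[a, b]], s.2)
  else s

-- 'if m[i][j] < min_weight … elif == …' with min_weight = float('inf') modelled as none
def aStepMin (w a b : Int) (s : List (List Int) × Option Int) : List (List Int) × Option Int :=
  if (match s.2 with | none => true | some v => decide (w < v)) = true then ([[a, b]], some w)
  else if s.2 = some w then (s.1 ++ [[a, b]], s.2)
  else s

def solution (m : List (List Int)) : List (List Int) :=
  let n : Int := m.length
  let st :=
    (PySem.List.pyRange 0 n).foldl (fun s i =>
      (PySem.List.pyRange (i + 1) n).foldl (fun s j =>
        let w := getw m i j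
        if w ≤ 0 then s
        else (aStepMax w (i + 1) (j + 1) s.1, aStepMin w (i + 1) (j + 1) s.2)) s)
      (([], none), ([], none))
  let maxEdges := PySem.List.sorted2 st.1.1 (fun x => PySem.List.pyGetD x 0 0) (fun x => PySem.List.pyGetD x 1 0)
  let minEdges := PySem.List.sorted2 st.2.1 (fun x => -(PySem.List.pyGetD x 0 0)) (fun x => -(PySem.List.pyGetD x 1 0))
  maxEdges ++ minEdges

-- ===== PORT B =====
def solution_alt (m : List (List Int)) : List (List Int) :=
  let n : Int := m.length
  let edges := (PySem.List.pyRange 0 n).flatMap (fun i =>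
    ((PySem.List.pyRange (i + 1) n).filter (fun j => decide (0 < getw m i j))).map
      (fun j => (i + 1, j + 1, getw m i j)))
  if edges = [] then []
  else
    let weights := edges.map (fun e => e.2.2)
    let mx := (PySem.List.max? weights (fun x => x)).getD 0
    let mn := (PySem.List.min? weights (fun x => x)).getD 0
    let top := PySem.List.sorted2 ((edges.filter (fun e => e.2.2 == mx)).map (fun e => (e.1, e.2.1)))
      (fun p => p.1) (fun p => p.2)
    let bot := PySem.List.sorted2 ((edges.filter (fun e => e.2.2 == mn)).map (fun e => (e.1, e.2.1)))
      (fun p => p.1) (fun p => p.2) true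
    (top ++ bot).map (fun p => [p.1, p.2])

-- ===== PRECONDITION & SPEC =====
-- Pre_ excludes exactly the ragged matrices on which Python A raises IndexError
-- (every row except possibly the last must have at least len(m) entries); A returns on all other inputs.
def Pre_solution (m : List (List Int)) : Prop :=
  ∀ r ∈ m.take (m.length - 1), m.length ≤ r.length
instance (m : List (List Int)) : Decidable (Pre_solution m) := by unfold Pre_solution; infer_instance

def pvWitness_solution : List (List Int) := [[0, 3], [3, 0]]

def Spec_solution (m : List (List Int)) (out : List (List Int)) : Prop := out = solution_alt m
instance (m : List (List Int)) (out : List (List Int)) : Decidable (Spec_solution m out) := by unfold Spec_solution; infer_instance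

-- ===== CLAIM (what is proved, stated in full; the proofs are below) =====
def Claim_equal_solution : Prop := ∀ (m : List (List Int)), Dom_solution m → Pre_solution m → Spec_solution m (solution m)

-- ===== LEMMAS AND PROOFS =====

-- all upper-triangle entries (i+1, j+1, weight) in traversal order
def edgesOf (m : List (List Int)) : List (Int × Int × Int) :=
  (PySem.List.pyRange 0 (m.length : Int)).flatMap (fun i =>
    (PySem.List.pyRange (i + 1) (m.length : Int)).map (fun j => (i + 1, j + 1, getw m i j)))

-- the positive-weight edges, in traversal order
def posOf (m : List (List Int)) : List (Int × Int × Int) :=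
  (edgesOf m).filter (fun e => decide (0 < e.2.2))

def wmax : List Int → Option Int
  | [] => none
  | x :: t => some (t.foldl max x)

def wmin : List Int → Option Int
  | [] => none
  | x :: t => some (t.foldl min x)

-- strict lexicographic order on (row, col) of a triple
def triLt (e f : Int × Int × Int) : Prop := e.1 < f.1 ∨ (e.1 = f.1 ∧ e.2.1 < f.2.1)

theorem wmax_append (ws : List Int) (x : Int) :
    wmax (ws ++ [x]) = some ((wmax ws).elim x (fun v => max v x)) := by
  cases ws with
  | nil => rfl
  | cons y t => simp [wmax, List.foldl_append]

theorem wmin_append (ws : List Int) (x : Int) :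
    wmin (ws ++ [x]) = some ((wmin ws).elim x (fun v => min v x)) := by
  cases ws with
  | nil => rfl
  | cons y t => simp [wmin, List.foldl_append]

theorem wmax_le {ws : List Int} {v : Int} (h : wmax ws = some v) : ∀ x ∈ ws, x ≤ v := by
  cases ws with
  | nil => simp [wmax] at h
  | cons y t =>
    simp only [wmax, Option.some.injEq] at h
    intro x hx
    rcases List.mem_cons.mp hx with rfl | hx
    · exact h ▸ (PySem.List.le_foldl_max t x).1
    · exact h ▸ (PySem.List.le_foldl_max t y).2 x hx

theorem wmin_ge {ws : List Int} {v : Int} (h : wmin ws = some v) : ∀ x ∈ ws, v ≤ x := by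
  cases ws with
  | nil => simp [wmin] at h
  | cons y t =>
    simp only [wmin, Option.some.injEq] at h
    intro x hx
    rcases List.mem_cons.mp hx with rfl | hx
    · exact h ▸ (PySem.List.foldl_min_le t x).1
    · exact h ▸ (PySem.List.foldl_min_le t y).2 x hx

-- A's online argmax loop collects exactly the edges whose weight is the running maximum
theorem foldl_aStepMax_char (l : List (Int × Int × Int)) :
    List.foldl (fun s e => aStepMax e.2.2 e.1 e.2.1 s) ([], none) l =
      ((l.filter (fun e => decide (some e.2.2 = wmax (l.map (fun e => e.2.2))))).map
        (fun e => [e.1, e.2.1]), wmax (l.map (fun e => e.2.2))) := by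
  induction l using List.reverseRecOn with
  | nil => rfl
  | append_singleton l e ih =>
    rw [List.foldl_append, ih]
    simp only [List.map_append, List.filter_append, List.map_cons, List.map_nil]
    rw [wmax_append]
    cases hw : wmax (l.map (fun e => e.2.2)) with
    | none =>
      have hl : l = [] := by
        cases l with
        | nil => rfl
        | cons a t => simp [wmax] at hw
      subst hl
      simp [aStepMax]
    | some v =>
      rw [Option.elim_some]
      rcases lt_trichotomy v e.2.2 with hlt | heq | hgt
      · rw [max_eq_right hlt.le]
        have hfl : l.filter (fun f => decide (some f.2.2 = some e.2.2)) = [] := by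
          rw [List.filter_eq_nil_iff]
          intro f hf
          have := wmax_le hw _ (List.mem_map_of_mem hf)
          simp only [decide_eq_true_eq, Option.some.injEq]
          omega
        rw [hfl]
        simp [aStepMax, hlt]
      · subst heq
        rw [max_self]
        simp [aStepMax]
      · rw [max_eq_left hgt.le]
        have hfe : List.filter (fun f => decide (some f.2.2 = some v)) [e] = [] := by
          simp; omega
        rw [hfe]
        simp [aStepMax, not_lt_of_gt hgt, hgt.ne']

-- A's online argmin loop collects exactly the edges whose weight is the running minimum
theorem foldl_aStepMin_char (l : List (Int × Int × Int)) :
    List.foldl (fun s e => aStepMin e.2.2 e.1 e.2.1 s) ([], none) l =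
      ((l.filter (fun e => decide (some e.2.2 = wmin (l.map (fun e => e.2.2))))).map
        (fun e => [e.1, e.2.1]), wmin (l.map (fun e => e.2.2))) := by
  induction l using List.reverseRecOn with
  | nil => rfl
  | append_singleton l e ih =>
    rw [List.foldl_append, ih]
    simp only [List.map_append, List.filter_append, List.map_cons, List.map_nil]
    rw [wmin_append]
    cases hw : wmin (l.map (fun e => e.2.2)) with
    | none =>
      have hl : l = [] := by
        cases l with
        | nil => rfl
        | cons a t => simp [wmin] at hw
      subst hl
      simp [aStepMin]
    | some v =>
      rw [Option.elim_some]
      rcases lt_trichotomy e.2.2 v with hlt | heq | hgt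
      · rw [min_eq_right hlt.le]
        have hfl : l.filter (fun f => decide (some f.2.2 = some e.2.2)) = [] := by
          rw [List.filter_eq_nil_iff]
          intro f hf
          have := wmin_ge hw _ (List.mem_map_of_mem hf)
          simp only [decide_eq_true_eq, Option.some.injEq]
          omega
        rw [hfl]
        simp [aStepMin, hlt]
      · subst heq
        rw [min_self]
        simp [aStepMin]
      · rw [min_eq_left hgt.le]
        have hfe : List.filter (fun f => decide (some f.2.2 = some v)) [e] = [] := by
          simp; omega
        rw [hfe]
        simp [aStepMin, not_lt_of_gt hgt, hgt.ne]

theorem pairwise_edgesOf (m : List (List Int)) : (edgesOf m).Pairwise triLt := by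
  unfold edgesOf
  rw [List.pairwise_flatMap]
  constructor
  · intro i _
    rw [List.pairwise_map]
    refine (PySem.List.pairwise_lt_pyRange_one _ _).imp (fun h => Or.inr ⟨rfl, ?_⟩)
    simpa using h
  · refine (PySem.List.pairwise_lt_pyRange_one _ _).imp ?_
    intro a b hab x hx y hy
    obtain ⟨j, _, rfl⟩ := List.mem_map.mp hx
    obtain ⟨k, _, rfl⟩ := List.mem_map.mp hy
    exact Or.inl (by omega)

-- inserting with a 'before' test that every earlier element refutes appends at the end
theorem foldl_insertBy_eq_append {α : Type} (before : α → α → Bool) (R : α → α → Prop)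
    (hRb : ∀ a b, R a b → before b a = false) :
    ∀ (xs acc : List α), (acc ++ xs).Pairwise R →
      xs.foldl (fun acc x => PySem.List.insertBy before x acc) acc = acc ++ xs := by
  intro xs
  induction xs with
  | nil => simp
  | cons x t ih =>
    intro acc hp
    have h1 : ∀ y ∈ acc, before x y = false := by
      intro y hy
      exact hRb _ _ ((List.pairwise_append.mp hp).2.2 y hy x (List.mem_cons_self ..))
    have h2 : (acc ++ [x] ++ t).Pairwise R := by
      rw [List.append_assoc]; simpa using hp
    simp only [List.foldl_cons]
    rw [PySem.List.insertBy_of_forall_not_before before x acc h1, ih _ h2]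
    simp

-- inserting with a 'before' test that every earlier element affirms prepends; the fold reverses
theorem foldl_insertBy_eq_reverse {α : Type} (before : α → α → Bool) (R : α → α → Prop)
    (hRb : ∀ a b, R a b → before b a = true) :
    ∀ (xs acc : List α), xs.Pairwise R → (∀ x ∈ xs, ∀ y ∈ acc, before x y = true) →
      xs.foldl (fun acc x => PySem.List.insertBy before x acc) acc = xs.reverse ++ acc := by
  intro xs
  induction xs with
  | nil => simp
  | cons x t ih =>
    intro acc hp hacc
    have hins : PySem.List.insertBy before x acc = x :: acc := by
      cases acc with
      | nil => simp [PySem.List.insertBy]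
      | cons y ys => simp [PySem.List.insertBy, hacc x (List.mem_cons_self ..) y (List.mem_cons_self ..)]
    have hacc' : ∀ z ∈ t, ∀ y ∈ x :: acc, before z y = true := by
      intro z hz y hy
      rcases List.mem_cons.mp hy with rfl | hy
      · exact hRb _ _ ((List.pairwise_cons.mp hp).1 z hz)
      · exact hacc z (List.mem_cons_of_mem _ hz) y hy
    simp only [List.foldl_cons]
    rw [hins, ih _ (List.pairwise_cons.mp hp).2 hacc']
    simp

theorem sorted2_asc_id {α : Type} (k1 k2 : α → Int) (xs : List α)
    (h : xs.Pairwise (fun a b => k1 a < k1 b ∨ (k1 a = k1 b ∧ k2 a < k2 b))) :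
    PySem.List.sorted2 xs k1 k2 = xs := by
  have := foldl_insertBy_eq_append
      (fun a b => decide (k1 a < k1 b) || (!decide (k1 b < k1 a) && decide (k2 a < k2 b)))
      (fun a b => k1 a < k1 b ∨ (k1 a = k1 b ∧ k2 a < k2 b))
      (by intro a b hab; rcases hab with h1 | ⟨h1, h2⟩ <;> simp <;> omega)
      xs [] (by simpa using h)
  simpa [PySem.List.sorted2] using this

theorem sorted2_rev_reverse {α : Type} (k1 k2 : α → Int) (xs : List α)
    (h : xs.Pairwise (fun a b => k1 a < k1 b ∨ (k1 a = k1 b ∧ k2 a < k2 b))) :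
    PySem.List.sorted2 xs k1 k2 true = xs.reverse := by
  have := foldl_insertBy_eq_reverse
      (fun a b => decide (k1 b < k1 a) || (!decide (k1 a < k1 b) && decide (k2 b < k2 a)))
      (fun a b => k1 a < k1 b ∨ (k1 a = k1 b ∧ k2 a < k2 b))
      (by intro a b hab; rcases hab with h1 | ⟨h1, h2⟩ <;> simp <;> omega)
      xs [] h (by simp)
  simpa [PySem.List.sorted2] using this

theorem sorted2_neg_reverse {α : Type} (k1 k2 : α → Int) (xs : List α)
    (h : xs.Pairwise (fun a b => k1 a < k1 b ∨ (k1 a = k1 b ∧ k2 a < k2 b))) :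
    PySem.List.sorted2 xs (fun x => -(k1 x)) (fun x => -(k2 x)) = xs.reverse := by
  have := foldl_insertBy_eq_reverse
      (fun a b => decide (-(k1 a) < -(k1 b)) || (!decide (-(k1 b) < -(k1 a)) && decide (-(k2 a) < -(k2 b))))
      (fun a b => k1 a < k1 b ∨ (k1 a = k1 b ∧ k2 a < k2 b))
      (by intro a b hab; rcases hab with h1 | ⟨h1, h2⟩ <;> simp <;> omega)
      xs [] h (by simp)
  simpa [PySem.List.sorted2] using this

-- A's nested loop is the edge-wise fold over the positive upper-triangle edges
theorem A_loop (m : List (List Int)) :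
    (PySem.List.pyRange 0 (m.length : Int)).foldl (fun s i =>
      (PySem.List.pyRange (i + 1) (m.length : Int)).foldl (fun s j =>
        let w := getw m i j
        if w ≤ 0 then s
        else (aStepMax w (i + 1) (j + 1) s.1, aStepMin w (i + 1) (j + 1) s.2)) s)
      ((([], none), ([], none)) : (List (List Int) × Option Int) × (List (List Int) × Option Int)) =
    List.foldl (fun s e => (aStepMax e.2.2 e.1 e.2.1 s.1, aStepMin e.2.2 e.1 e.2.1 s.2))
      (([], none), ([], none)) (posOf m) := by
  rw [posOf, ← PySem.List.foldl_ite_eq_foldl_filter (p := fun e : Int × Int × Int => 0 < e.2.2)]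
  unfold edgesOf
  rw [List.foldl_flatMap]
  apply PySem.List.foldl_congr_mem
  intro acc i _
  rw [List.foldl_map]
  apply PySem.List.foldl_congr_mem
  intro acc2 j _
  dsimp only
  by_cases h : getw m i j ≤ 0
  · simp [h, not_lt.mpr h]
  · simp [h, not_le.mp h]

theorem B_edges (m : List (List Int)) :
    ((PySem.List.pyRange 0 (m.length : Int)).flatMap (fun i =>
      ((PySem.List.pyRange (i + 1) (m.length : Int)).filter (fun j => decide (0 < getw m i j))).map
        (fun j => (i + 1, j + 1, getw m i j)))) = posOf m := by
  unfold posOf edgesOf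
  rw [List.filter_flatMap]
  congr 1
  funext i
  rw [List.filter_map]
  rfl

theorem wmax_of_ne_nil {ws : List Int} (h : ws ≠ []) :
    some ((PySem.List.max? ws (fun x => x)).getD 0) = wmax ws := by
  cases ws with
  | nil => exact absurd rfl h
  | cons x t => rw [PySem.List.max?_id_cons]; rfl

theorem wmin_of_ne_nil {ws : List Int} (h : ws ≠ []) :
    some ((PySem.List.min? ws (fun x => x)).getD 0) = wmin ws := by
  cases ws with
  | nil => exact absurd rfl h
  | cons x t => rw [PySem.List.min?_id_cons]; rfl

-- ===== VERDICT (by name: the statement is the Claim_ definition above) =====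
theorem solution_spec : Claim_equal_solution := by
  intro m _ _
  unfold Spec_solution solution solution_alt
  dsimp only
  rw [A_loop, B_edges,
    PySem.List.foldl_prod_mk (fun s e => aStepMax e.2.2 e.1 e.2.1 s)
      (fun s e => aStepMin e.2.2 e.1 e.2.1 s) (posOf m) ([], none) ([], none),
    foldl_aStepMax_char, foldl_aStepMin_char]
  have hpos : (posOf m).Pairwise triLt := (pairwise_edgesOf m).filter _
  by_cases h0 : posOf m = []
  · simp [h0, PySem.List.sorted2]
  · rw [if_neg h0]
    have hw : (posOf m).map (fun e => e.2.2) ≠ [] := by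
      simpa [List.map_eq_nil_iff] using h0
    have hmx := wmax_of_ne_nil hw
    have hmn := wmin_of_ne_nil hw
    have hfx : (posOf m).filter
        (fun e => e.2.2 == (PySem.List.max? ((posOf m).map (fun e => e.2.2)) (fun x => x)).getD 0) =
        (posOf m).filter (fun e => decide (some e.2.2 = wmax ((posOf m).map (fun e => e.2.2)))) := by
      apply List.filter_congr
      intro e _
      rw [← hmx]
      simp only [Option.some.injEq]
      rw [Bool.beq_eq_decide_eq]
    have hfn : (posOf m).filter
        (fun e => e.2.2 == (PySem.List.min? ((posOf m).map (fun e => e.2.2)) (fun x => x)).getD 0) =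
        (posOf m).filter (fun e => decide (some e.2.2 = wmin ((posOf m).map (fun e => e.2.2)))) := by
      apply List.filter_congr
      intro e _
      rw [← hmn]
      simp only [Option.some.injEq]
      rw [Bool.beq_eq_decide_eq]
    rw [hfx, hfn]
    set Tx := (posOf m).filter (fun e => decide (some e.2.2 = wmax ((posOf m).map (fun e => e.2.2)))) with hTx
    set Tn := (posOf m).filter (fun e => decide (some e.2.2 = wmin ((posOf m).map (fun e => e.2.2)))) with hTn
    have hpx : Tx.Pairwise triLt := hpos.filter _
    have hpn : Tn.Pairwise triLt := hpos.filter _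
    have hkx : (Tx.map (fun e => [e.1, e.2.1])).Pairwise
        (fun a b => PySem.List.pyGetD a 0 0 < PySem.List.pyGetD b 0 0 ∨
          (PySem.List.pyGetD a 0 0 = PySem.List.pyGetD b 0 0 ∧ PySem.List.pyGetD a 1 0 < PySem.List.pyGetD b 1 0)) := by
      rw [List.pairwise_map]
      refine hpx.imp ?_
      intro e f hef
      simpa [pysem] using hef
    have hkn : (Tn.map (fun e => [e.1, e.2.1])).Pairwise
        (fun a b => PySem.List.pyGetD a 0 0 < PySem.List.pyGetD b 0 0 ∨
          (PySem.List.pyGetD a 0 0 = PySem.List.pyGetD b 0 0 ∧ PySem.List.pyGetD a 1 0 < PySem.List.pyGetD b 1 0)) := by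
      rw [List.pairwise_map]
      refine hpn.imp ?_
      intro e f hef
      simpa [pysem] using hef
    have hpx2 : (Tx.map (fun e => (e.1, e.2.1))).Pairwise
        (fun a b => a.1 < b.1 ∨ (a.1 = b.1 ∧ a.2 < b.2)) := by
      rw [List.pairwise_map]
      exact hpx.imp (fun h => h)
    have hpn2 : (Tn.map (fun e => (e.1, e.2.1))).Pairwise
        (fun a b => a.1 < b.1 ∨ (a.1 = b.1 ∧ a.2 < b.2)) := by
      rw [List.pairwise_map]
      exact hpn.imp (fun h => h)
    rw [sorted2_asc_id _ _ _ hkx,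
      sorted2_neg_reverse (fun x => PySem.List.pyGetD x 0 0) (fun x => PySem.List.pyGetD x 1 0) _ hkn,
      sorted2_asc_id _ _ _ hpx2,
      sorted2_rev_reverse _ _ _ hpn2]
    simp [List.map_map, Function.comp_def]
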